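-- pv_equiv track=rewrite | github.com/daniil49926/Python_lessons | Module16/07_roller_skates/main.py | search
-- ===== SOURCE A (Python) =====
-- def search(first_list, second_list):
--     rez = 0
--     for i in range(len(second_list)):
--         for j in range(len(first_list)):
--             if second_list[i] <= first_list[j]:
--                 rez += 1
--                 first_list.remove(first_list[j])
--                 break
--     return rez
-- ===== SOURCE B (Python) =====
-- # Segment-tree (tournament tree) of maxima over first_list: each query value
-- # descends to the LEFTMOST still-alive slot >= v in O(log n) instead of A's
-- # O(n) rescans; O((n+m) log n) total.  Return value only: B does not mutate
-- # first_list (A removes the matched elements in place).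
--
-- def _omax(a, b):
--     if a is None:
--         return b
--     if b is None:
--         return a
--     return a if a >= b else b
--
--
-- def _build(xs):
--     if len(xs) == 1:
--         return ('leaf', xs[0])
--     mid = len(xs) // 2
--     l = _build(xs[:mid])
--     r = _build(xs[mid:])
--     return ('node', _omax(l[1], r[1]), l, r)
--
--
-- def _delete(t, v):
--     # precondition: t[1] is not None and v <= t[1]
--     if t[0] == 'leaf':
--         return ('leaf', None)
--     _, _, l, r = t
--     tl = l[1]
--     if tl is not None and v <= tl:
--         l2 = _delete(l, v)
--         return ('node', _omax(l2[1], r[1]), l2, r)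
--     r2 = _delete(r, v)
--     return ('node', _omax(l[1], r2[1]), l, r2)
--
--
-- def search(first_list, second_list):
--     if not first_list:
--         return 0
--     t = _build(first_list)
--     rez = 0
--     for v in second_list:
--         top = t[1]
--         if top is not None and v <= top:
--             t = _delete(t, v)
--             rez += 1
--     return rez
-- ===== Notes on version B (the rewrite author's own statement) =====
-- stated objective: faster
-- what changed: B builds a tournament (segment) tree of maxima over first_list and answers each second_list value by descending to the leftmost still-alive slot >= v and killing it, replacing A's repeated linear scan-and-remove of first_list; B does not mutate first_list.
import Mathlib
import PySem

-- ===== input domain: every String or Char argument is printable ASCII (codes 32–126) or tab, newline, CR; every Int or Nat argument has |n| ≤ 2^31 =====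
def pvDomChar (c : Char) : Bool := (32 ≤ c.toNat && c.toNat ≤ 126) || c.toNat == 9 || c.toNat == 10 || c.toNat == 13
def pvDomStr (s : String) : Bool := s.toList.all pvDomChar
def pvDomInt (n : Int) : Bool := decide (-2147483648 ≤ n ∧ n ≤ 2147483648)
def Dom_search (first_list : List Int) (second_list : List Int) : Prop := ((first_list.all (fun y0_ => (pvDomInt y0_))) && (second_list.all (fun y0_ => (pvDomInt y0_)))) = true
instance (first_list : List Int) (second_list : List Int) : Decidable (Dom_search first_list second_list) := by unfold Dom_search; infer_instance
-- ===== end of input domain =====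

-- B replaces A's repeated linear scan-and-remove with a tournament (segment) tree of
-- maxima, descending to the leftmost still-alive slot that fits (objective: faster).
-- Equivalence is about the RETURN value only: Python A removes the matched elements
-- from first_list in place, B does not mutate its arguments.

-- ===== PORT A =====
-- inner `for j in range(len(first_list))` with `first_list.remove(first_list[j]); break`:
-- at the found index every earlier element is strictly smaller, hence ≠ the removed value,
-- so `remove` deletes exactly the element at that index — ported as a first-match scan.
def removeFirstGE (v : Int) : List Int → Option (List Int)
  | [] => none
  | x :: xs => if v ≤ x then some xs else (removeFirstGE v xs).map (x :: ·)

-- the outer `for i in range(len(second_list))` loop with accumulator `rez`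
def searchGo : List Int → List Int → Int → Int
  | _, [], rez => rez
  | fl, v :: sl, rez =>
    match removeFirstGE v fl with
    | some fl' => searchGo fl' sl (rez + 1)
    | none => searchGo fl sl rez

def search (first_list : List Int) (second_list : List Int) : Int :=
  searchGo first_list second_list 0

-- ===== PORT B =====
-- a tree node carries the max over its still-alive leaves (none = all dead);
-- Python's tuples ('leaf', v) / ('node', m, l, r) become this inductive
inductive STree : Type
  | leaf : Option Int → STree
  | node : Option Int → STree → STree → STree
deriving Repr

def STree.top : STree → Option Int
  | .leaf o => o
  | .node o _ _ => o

-- Python helper _omax: max of two optional values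
def omax : Option Int → Option Int → Option Int
  | none, b => b
  | a, none => a
  | some x, some y => some (max x y)

-- Python _build: split in half, recurse ( [] is unreachable: search_alt guards it )
def build : List Int → STree
  | [] => .leaf none
  | [x] => .leaf (some x)
  | x :: y :: rest =>
    let mid := (x :: y :: rest).length / 2
    let l := build ((x :: y :: rest).take mid)
    let r := build ((x :: y :: rest).drop mid)
    .node (omax l.top r.top) l r
termination_by xs => xs.length
decreasing_by
  · simp [List.length_take]; omega
  · simp; omega

-- Python _delete: descend to the leftmost alive leaf ≥ v, kill it, recompute maxima
def delete : STree → Int → STree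
  | .leaf _, _ => .leaf none
  | .node _ l r, v =>
    match l.top with
    | some tl =>
      if v ≤ tl then
        let l2 := delete l v
        .node (omax l2.top r.top) l2 r
      else
        let r2 := delete r v
        .node (omax l.top r2.top) l r2
    | none =>
      let r2 := delete r v
      .node (omax l.top r2.top) l r2

-- the `for v in second_list` loop over state (t, rez)
def searchLoop : List Int → STree → Int → Int
  | [], _, rez => rez
  | v :: vs, t, rez =>
    match t.top with
    | some m => if v ≤ m then searchLoop vs (delete t v) (rez + 1) else searchLoop vs t rez
    | none => searchLoop vs t rez

def search_alt (first_list : List Int) (second_list : List Int) : Int :=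
  match first_list with
  | [] => 0
  | _ => searchLoop second_list (build first_list) 0

-- ===== PRECONDITION & SPEC =====
def Spec_search (first_list : List Int) (second_list : List Int) (out : Int) : Prop := out = search_alt first_list second_list
instance (first_list : List Int) (second_list : List Int) (out : Int) : Decidable (Spec_search first_list second_list out) := by unfold Spec_search; infer_instance

-- ===== CLAIM =====
def Claim_equal_search : Prop := ∀ (first_list : List Int) (second_list : List Int), Dom_search first_list second_list → Spec_search first_list second_list (search first_list second_list)

-- ===== LEMMAS AND PROOFS =====

-- the in-order list of still-alive leaf values
def fringe : STree → List Int
  | .leaf none => []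
  | .leaf (some x) => [x]
  | .node _ l r => fringe l ++ fringe r

-- well-formedness: every cached max is the omax of the children's caches
def WFT : STree → Prop
  | .leaf _ => True
  | .node o l r => o = omax l.top r.top ∧ WFT l ∧ WFT r

def listMax : List Int → Option Int
  | [] => none
  | x :: xs => omax (some x) (listMax xs)

theorem omax_assoc (a b c : Option Int) : omax (omax a b) c = omax a (omax b c) := by
  cases a <;> cases b <;> cases c <;> simp [omax, max_assoc]

theorem listMax_append (a b : List Int) :
    listMax (a ++ b) = omax (listMax a) (listMax b) := by
  induction a with
  | nil => simp [listMax, omax]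
  | cons x xs ih => simp [listMax, ih, omax_assoc]

theorem listMax_eq_none (l : List Int) : listMax l = none ↔ l = [] := by
  cases l with
  | nil => simp [listMax]
  | cons x xs => cases h : listMax xs <;> simp [listMax, h, omax]

theorem listMax_ex_iff (l : List Int) (v : Int) :
    (∃ x ∈ l, v ≤ x) ↔ (∃ m, listMax l = some m ∧ v ≤ m) := by
  induction l with
  | nil => simp [listMax]
  | cons a xs ih =>
    cases h : listMax xs with
    | none =>
      have hx : xs = [] := (listMax_eq_none xs).mp h
      subst hx
      simp [listMax, omax]
    | some m2 =>
      constructor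
      · rintro ⟨y, hy, hvy⟩
        refine ⟨max a m2, by simp [listMax, h, omax], ?_⟩
        rcases List.mem_cons.mp hy with rfl | hy'
        · exact le_max_of_le_left hvy
        · rcases ih.mp ⟨y, hy', hvy⟩ with ⟨m, hm, hvm⟩
          rw [h] at hm
          injection hm with hm'
          subst hm'
          exact le_max_of_le_right hvm
      · rintro ⟨m, hm, hvm⟩
        simp only [listMax, h, omax] at hm
        injection hm with hm'
        subst hm'
        rcases le_max_iff.mp hvm with hva | hvm2
        · exact ⟨a, by simp, hva⟩
        · rcases ih.mpr ⟨m2, h, hvm2⟩ with ⟨y, hy, hvy⟩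
          exact ⟨y, by simp [hy], hvy⟩

theorem top_eq (t : STree) (h : WFT t) : t.top = listMax (fringe t) := by
  induction t with
  | leaf o => cases o <;> simp [STree.top, fringe, listMax, omax]
  | node o l r ihl ihr =>
    obtain ⟨ho, hl, hr⟩ := h
    rw [show (STree.node o l r).top = o from rfl,
        show fringe (.node o l r) = fringe l ++ fringe r from rfl, listMax_append,
        ho, ihl hl, ihr hr]

theorem removeFirstGE_eq_none_iff (v : Int) (l : List Int) :
    removeFirstGE v l = none ↔ ∀ x ∈ l, ¬ v ≤ x := by
  induction l with
  | nil => simp [removeFirstGE]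
  | cons x xs ih =>
    by_cases hvx : v ≤ x
    · simp [removeFirstGE, hvx]
    · simp only [removeFirstGE, hvx, if_false, Option.map_eq_none_iff, ih]
      constructor
      · rintro hall y hy
        rcases List.mem_cons.mp hy with rfl | hy'
        · exact hvx
        · exact hall y hy'
      · intro hall y hy
        exact hall y (List.mem_cons_of_mem _ hy)

theorem removeFirstGE_append_some (v : Int) (a b a' : List Int)
    (h : removeFirstGE v a = some a') :
    removeFirstGE v (a ++ b) = some (a' ++ b) := by
  induction a generalizing a' with
  | nil => simp [removeFirstGE] at h
  | cons x xs ih =>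
    by_cases hvx : v ≤ x
    · simp [removeFirstGE, hvx] at h ⊢; simp [h]
    · simp [removeFirstGE, hvx] at h ⊢
      obtain ⟨xs', hxs', rfl⟩ := h
      exact ⟨xs' ++ b, ih _ hxs', by simp⟩

theorem removeFirstGE_append_none (v : Int) (a b : List Int)
    (h : removeFirstGE v a = none) :
    removeFirstGE v (a ++ b) = (removeFirstGE v b).map (a ++ ·) := by
  induction a with
  | nil => simp
  | cons x xs ih =>
    by_cases hvx : v ≤ x
    · simp [removeFirstGE, hvx] at h
    · simp [removeFirstGE, hvx] at h ⊢
      rw [ih h]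
      cases removeFirstGE v b <;> simp

theorem delete_spec (t : STree) (v : Int) (hinv : WFT t)
    (hex : ∃ x ∈ fringe t, v ≤ x) :
    removeFirstGE v (fringe t) = some (fringe (delete t v)) ∧ WFT (delete t v) := by
  induction t with
  | leaf o =>
    cases o with
    | none => simp [fringe] at hex
    | some x =>
      simp [fringe] at hex
      simp [fringe, delete, removeFirstGE, hex, WFT]
  | node o l r ihl ihr =>
    obtain ⟨ho, hIl, hIr⟩ := hinv
    have htl := top_eq l hIl
    cases hlt : l.top with
    | some tl =>
      by_cases hvtl : v ≤ tl
      · -- descend left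
        have hexl : ∃ x ∈ fringe l, v ≤ x := by
          refine (listMax_ex_iff _ _).mpr ⟨tl, ?_, hvtl⟩
          rw [← htl, hlt]
        obtain ⟨hrem, hI2⟩ := ihl hIl hexl
        refine ⟨?_, ?_⟩
        · simp only [fringe, delete, hlt, hvtl, if_true]
          exact removeFirstGE_append_some v _ _ _ hrem
        · simp only [delete, hlt, hvtl, if_true]
          exact ⟨rfl, hI2, hIr⟩
      · -- no fit in the left subtree
        have hnol : removeFirstGE v (fringe l) = none := by
          rw [removeFirstGE_eq_none_iff]
          intro x hx hvx
          rcases (listMax_ex_iff (fringe l) v).mp ⟨x, hx, hvx⟩ with ⟨m, hm, hvm⟩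
          rw [← htl, hlt] at hm; cases hm; exact hvtl hvm
        have hexr : ∃ x ∈ fringe r, v ≤ x := by
          rcases hex with ⟨x, hx, hvx⟩
          simp only [fringe, List.mem_append] at hx
          rcases hx with hx | hx
          · exact absurd hvx (by
              have := (removeFirstGE_eq_none_iff v (fringe l)).mp hnol
              exact this x hx)
          · exact ⟨x, hx, hvx⟩
        obtain ⟨hrem, hI2⟩ := ihr hIr hexr
        refine ⟨?_, ?_⟩
        · simp only [fringe, delete, hlt, hvtl, if_false]
          rw [removeFirstGE_append_none v _ _ hnol, hrem]
          simp [fringe]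
        · simp only [delete, hlt, hvtl, if_false]
          exact ⟨by rw [hlt], hIl, hI2⟩
    | none =>
      have hfl : fringe l = [] := by
        rw [← listMax_eq_none, ← htl, hlt]
      have hexr : ∃ x ∈ fringe r, v ≤ x := by
        rcases hex with ⟨x, hx, hvx⟩
        simp only [fringe, hfl, List.nil_append] at hx
        exact ⟨x, hx, hvx⟩
      obtain ⟨hrem, hI2⟩ := ihr hIr hexr
      refine ⟨?_, ?_⟩
      · simp only [fringe, delete, hlt, hfl, List.nil_append]
        exact hrem
      · simp only [delete, hlt]
        exact ⟨by rw [hlt], hIl, hI2⟩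

theorem go_eq (sl : List Int) : ∀ (t : STree) (rez : Int), WFT t →
    searchGo (fringe t) sl rez = searchLoop sl t rez := by
  induction sl with
  | nil => intro t rez _; cases h : fringe t <;> simp [searchGo, searchLoop]
  | cons v vs ih =>
    intro t rez hinv
    have htop := top_eq t hinv
    cases ht : t.top with
    | none =>
      have hfl : fringe t = [] := by rw [← listMax_eq_none, ← htop, ht]
      have : removeFirstGE v (fringe t) = none := by simp [hfl, removeFirstGE]
      simp only [searchGo, searchLoop, this, ht]
      exact ih t rez hinv
    | some m =>
      by_cases hvm : v ≤ m
      · have hex : ∃ x ∈ fringe t, v ≤ x := by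
          refine (listMax_ex_iff _ _).mpr ⟨m, ?_, hvm⟩
          rw [← htop, ht]
        obtain ⟨hrem, hI2⟩ := delete_spec t v hinv hex
        simp only [searchGo, searchLoop, hrem, ht, hvm, if_true]
        exact ih _ _ hI2
      · have hnone : removeFirstGE v (fringe t) = none := by
          rw [removeFirstGE_eq_none_iff]
          intro x hx hvx
          rcases (listMax_ex_iff (fringe t) v).mp ⟨x, hx, hvx⟩ with ⟨m', hm', hvm'⟩
          rw [← htop, ht] at hm'; cases hm'; exact hvm hvm'
        simp only [searchGo, searchLoop, hnone, ht, hvm, if_false]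
        exact ih t rez hinv

theorem build_spec_aux : ∀ (n : Nat) (xs : List Int), xs.length ≤ n → xs ≠ [] →
    fringe (build xs) = xs ∧ WFT (build xs) := by
  intro n
  induction n with
  | zero =>
    intro xs hlen hne
    cases xs with
    | nil => exact absurd rfl hne
    | cons a t => simp at hlen
  | succ n ih =>
    intro xs hlen hne
    match xs with
    | [x] => simp [build, fringe, WFT]
    | x :: y :: rest =>
      rw [build]
      have hlen2 : (x :: y :: rest).length = rest.length + 2 := by simp
      have htake : ((x :: y :: rest).take ((x :: y :: rest).length / 2)).length ≤ n := by
        simp only [List.length_take, hlen2] at *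
        omega
      have hdrop : ((x :: y :: rest).drop ((x :: y :: rest).length / 2)).length ≤ n := by
        simp only [List.length_drop, hlen2] at *
        omega
      have htne : (x :: y :: rest).take ((x :: y :: rest).length / 2) ≠ [] := by
        intro h
        have := congrArg List.length h
        simp only [List.length_take, hlen2, List.length_nil] at this
        omega
      have hdne : (x :: y :: rest).drop ((x :: y :: rest).length / 2) ≠ [] := by
        intro h
        have := congrArg List.length h
        simp only [List.length_drop, hlen2, List.length_nil] at this
        omega
      obtain ⟨hfl, hIl⟩ := ih _ htake htne
      obtain ⟨hfr, hIr⟩ := ih _ hdrop hdne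
      refine ⟨?_, rfl, hIl, hIr⟩
      simp only [fringe, hfl, hfr, List.take_append_drop]

theorem build_spec (xs : List Int) (hne : xs ≠ []) :
    fringe (build xs) = xs ∧ WFT (build xs) := build_spec_aux xs.length xs le_rfl hne

theorem searchGo_empty (sl : List Int) (rez : Int) : searchGo [] sl rez = rez := by
  induction sl with
  | nil => rfl
  | cons v sl ih => simp [searchGo, removeFirstGE, ih]

-- ===== VERDICT =====
theorem search_spec : Claim_equal_search := by
  intro fl sl _
  unfold Spec_search search search_alt
  match fl with
  | [] => exact searchGo_empty sl 0
  | x :: fl' =>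
    obtain ⟨hf, hI⟩ := build_spec (x :: fl') (by simp)
    conv_lhs => rw [← hf]
    exact go_eq sl _ 0 hI
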